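-- pv_equiv track=rewrite | github.com/naplr/heap-challenge | domdist.py | _normalize_li
-- ===== SOURCE A (Python) =====
-- def _get_type(s):
--     if (s[0] == '#'):
--         return 'id'
--     elif (s[0] == '.'):
--         return 'cls'
--     else:
--         return 'tag'
--
-- def _normalize_li(li):
--     """
--     Sort the class sections of each tag.
--     """
--     norm_li = []
--     temp_cls_li = []
--     for i in range(len(li)):
--         t = _get_type(li[i])
--         if t == 'cls':
--             temp_cls_li.append(li[i])
--         else:
--             norm_li.extend(sorted(temp_cls_li))
--             norm_li.append(li[i])
--             temp_cls_li = []
--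
--     if len(temp_cls_li) > 0:
--         norm_li.extend(sorted(temp_cls_li))
--
--     return norm_li
-- ===== SOURCE B (Python) =====
-- def _get_type(s):
--     if (s[0] == '#'):
--         return 'id'
--     elif (s[0] == '.'):
--         return 'cls'
--     else:
--         return 'tag'
--
-- def _normalize_li(li):
--     """
--     Sort the class sections of each tag.
--     """
--     out = []
--     i = 0
--     n = len(li)
--     while i < n:
--         t = _get_type(li[i])
--         j = i + 1
--         while j < n and _get_type(li[j]) == t:
--             j += 1
--         run = li[i:j]
--         out += sorted(run) if t == 'cls' else run
--         i = j
--     return out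
-- ===== Notes on version B (the rewrite author's own statement) =====
-- stated objective: alternative
-- what changed: B splits the input into maximal runs of consecutive same-type items (a manual groupby) and emits each run at once, sorting the 'cls' runs, eliminating A's pending temp_cls_li accumulator and its separate end-of-loop flush.
import Mathlib
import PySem

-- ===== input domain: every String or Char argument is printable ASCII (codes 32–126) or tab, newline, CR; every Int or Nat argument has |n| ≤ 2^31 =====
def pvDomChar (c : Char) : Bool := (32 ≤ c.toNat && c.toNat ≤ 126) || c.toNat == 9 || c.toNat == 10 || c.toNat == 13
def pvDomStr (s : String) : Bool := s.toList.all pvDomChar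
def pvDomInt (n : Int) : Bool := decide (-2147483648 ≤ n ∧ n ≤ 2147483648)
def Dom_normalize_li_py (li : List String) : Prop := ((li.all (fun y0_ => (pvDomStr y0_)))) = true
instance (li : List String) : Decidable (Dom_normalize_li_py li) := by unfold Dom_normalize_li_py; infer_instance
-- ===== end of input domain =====

-- B replaces A's pending-accumulator loop by splitting the list into maximal runs of
-- consecutive same-type items and sorting the 'cls' runs (objective: alternative decomposition).

-- ===== PORT A =====
-- shared helper: port of _get_type; s[0] raises IndexError on "", so the result is Option
def pvTyp (s : String) : Option String :=
  match PySem.Str.pyGet? s 0 with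
  | none => none
  | some c => if c = '#' then some "id" else if c = '.' then some "cls" else some "tag"

-- one iteration of A's for-loop: state is (norm_li, temp_cls_li)
def pvStepA (st : List String × List String) (x : String) : List String × List String :=
  if pvTyp x == some "cls" then (st.1, st.2 ++ [x])
  else (st.1 ++ PySem.List.sorted st.2 (fun s => s) false ++ [x], [])

def normalize_li_py (li : List String) : List String :=
  let st := li.foldl pvStepA ([], [])
  if st.2.length > 0 then st.1 ++ PySem.List.sorted st.2 (fun s => s) false else st.1

-- ===== PORT B =====
-- B's outer while-loop: take the maximal run of items with the head's type, emit it
-- (sorted if the type is 'cls'), recurse on the remainder.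
def pvAltGo : List String → List String
  | [] => []
  | x :: xs =>
    (if pvTyp x == some "cls"
     then PySem.List.sorted (x :: xs.takeWhile (fun y => pvTyp y == pvTyp x)) (fun s => s) false
     else x :: xs.takeWhile (fun y => pvTyp y == pvTyp x))
    ++ pvAltGo (xs.dropWhile (fun y => pvTyp y == pvTyp x))
  termination_by l => l.length
  decreasing_by
    have := List.length_dropWhile_le (fun y => pvTyp y == pvTyp x) xs
    simp; omega

def normalize_li_py_alt (li : List String) : List String := pvAltGo li

-- ===== PRECONDITION & SPEC =====
-- Pre_ excludes lists containing an empty string: there _get_type does s[0] and the Python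
-- (both A and B) raises IndexError.
def Pre_normalize_li_py (li : List String) : Prop := ∀ s ∈ li, s ≠ ""
instance (li : List String) : Decidable (Pre_normalize_li_py li) := by unfold Pre_normalize_li_py; infer_instance
def pvWitness_normalize_li_py : List String := ["div", ".b", ".a", "#x", ".c"]

def Spec_normalize_li_py (li : List String) (out : List String) : Prop := out = normalize_li_py_alt li
instance (li : List String) (out : List String) : Decidable (Spec_normalize_li_py li out) := by unfold Spec_normalize_li_py; infer_instance

-- ===== CLAIM (what is proved, stated in full; the proofs are below) =====
def Claim_equal_normalize_li_py : Prop := ∀ (li : List String), Dom_normalize_li_py li → Pre_normalize_li_py li → Spec_normalize_li_py li (normalize_li_py li)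

-- ===== LEMMAS AND PROOFS =====

@[simp] theorem pvSortedNil : PySem.List.sorted ([] : List String) (fun s => s) false = [] := rfl

-- the non-cls run emitted verbatim by pvAltGo can be re-expressed via the cls-run split
theorem pvRun_noncls (k : Option String) (hk : (k == some "cls") = false) (xs : List String) :
    xs.takeWhile (fun y => pvTyp y == k) ++ pvAltGo (xs.dropWhile (fun y => pvTyp y == k))
    = PySem.List.sorted (xs.takeWhile (fun y => pvTyp y == some "cls")) (fun s => s) false
      ++ pvAltGo (xs.dropWhile (fun y => pvTyp y == some "cls")) := by
  cases xs with
  | nil => simp [pvAltGo]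
  | cons y ys =>
    by_cases hy : pvTyp y = k
    · have hyc : (pvTyp y == some "cls") = false := by rw [hy]; exact hk
      rw [List.takeWhile_cons, List.dropWhile_cons]
      simp only [hy, beq_self_eq_true, if_true]
      rw [List.takeWhile_cons, List.dropWhile_cons]
      simp only [hyc, if_false, Bool.false_eq_true]
      have : pvAltGo (y :: ys)
          = (y :: ys.takeWhile (fun z => pvTyp z == pvTyp y))
            ++ pvAltGo (ys.dropWhile (fun z => pvTyp z == pvTyp y)) := by
        rw [pvAltGo]; simp [hyc]
      rw [this, hy]
      simp
    · have hyk : (pvTyp y == k) = false := by simp [hy]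
      rw [List.takeWhile_cons, List.dropWhile_cons]
      simp only [hyk, if_false, Bool.false_eq_true, List.nil_append]
      by_cases hc : pvTyp y = some "cls"
      · rw [List.takeWhile_cons, List.dropWhile_cons]
        simp only [hc, beq_self_eq_true, if_true]
        rw [pvAltGo]
        simp [hc]
      · have hcc : (pvTyp y == some "cls") = false := by simp [hc]
        rw [List.takeWhile_cons, List.dropWhile_cons]
        simp only [hcc, if_false, Bool.false_eq_true]
        simp

-- invariant of A's fold: the finished result is norm ++ sorted(temp ++ leading cls run) ++ B on the rest
theorem pvFoldA_inv (li : List String) : ∀ (norm temp : List String),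
    (fun st : List String × List String =>
      if st.2.length > 0 then st.1 ++ PySem.List.sorted st.2 (fun s => s) false else st.1)
      (li.foldl pvStepA (norm, temp))
    = norm ++ PySem.List.sorted (temp ++ li.takeWhile (fun y => pvTyp y == some "cls")) (fun s => s) false
        ++ pvAltGo (li.dropWhile (fun y => pvTyp y == some "cls")) := by
  induction li with
  | nil =>
    intro norm temp
    cases temp with
    | nil => simp [pvAltGo]
    | cons t ts => simp [pvAltGo]
  | cons x xs ih =>
    intro norm temp
    by_cases hx : pvTyp x = some "cls"
    · have hxt : (pvTyp x == some "cls") = true := by simp [hx]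
      rw [List.foldl_cons]
      have hstep : pvStepA (norm, temp) x = (norm, temp ++ [x]) := by
        simp [pvStepA, hxt]
      rw [hstep, ih]
      rw [List.takeWhile_cons, List.dropWhile_cons]
      simp [hxt]
    · have hxt : (pvTyp x == some "cls") = false := by simp [hx]
      rw [List.foldl_cons]
      have hstep : pvStepA (norm, temp) x
          = (norm ++ PySem.List.sorted temp (fun s => s) false ++ [x], []) := by
        simp [pvStepA, hxt]
      rw [hstep, ih]
      rw [List.takeWhile_cons, List.dropWhile_cons]
      simp only [hxt, if_false, Bool.false_eq_true]
      have hB : pvAltGo (x :: xs)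
          = (x :: xs.takeWhile (fun z => pvTyp z == pvTyp x))
            ++ pvAltGo (xs.dropWhile (fun z => pvTyp z == pvTyp x)) := by
        rw [pvAltGo]; simp [hxt]
      rw [hB]
      have h2 := pvRun_noncls (pvTyp x) hxt xs
      rw [List.cons_append, h2]
      simp

-- B equals the cls-run split form of itself
theorem pvAltGo_split (li : List String) :
    PySem.List.sorted (li.takeWhile (fun y => pvTyp y == some "cls")) (fun s => s) false
      ++ pvAltGo (li.dropWhile (fun y => pvTyp y == some "cls"))
    = pvAltGo li := by
  cases li with
  | nil => simp [pvAltGo]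
  | cons x xs =>
    by_cases hx : pvTyp x = some "cls"
    · have hxt : (pvTyp x == some "cls") = true := by simp [hx]
      rw [List.takeWhile_cons, List.dropWhile_cons]
      simp only [hxt, if_true]
      conv_rhs => rw [pvAltGo]
      simp [hx]
    · have hxt : (pvTyp x == some "cls") = false := by simp [hx]
      rw [List.takeWhile_cons, List.dropWhile_cons]
      simp only [hxt, if_false, Bool.false_eq_true]
      simp

-- ===== VERDICT (by name: the statement is the Claim_ definition above) =====
theorem normalize_li_py_spec : Claim_equal_normalize_li_py := by
  intro li _ _
  show normalize_li_py li = normalize_li_py_alt li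
  unfold normalize_li_py normalize_li_py_alt
  have h := pvFoldA_inv li [] []
  simp only [List.nil_append] at h
  rw [h]
  exact pvAltGo_split li
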